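-- pv_equiv track=rewrite | github.com/sc1f/garage61mcp | src/cache.py | _group_tracks_by_base_name
-- ===== SOURCE A (Python) =====
-- from typing import List, Dict, Any, Optional, Tuple
--
-- def _group_tracks_by_base_name(tracks: List[Dict[str, Any]]) -> Dict[str, List[Dict[str, Any]]]:
--     """Group tracks by their base name (without variant)."""
--     grouped = {}
--     for track in tracks:
--         base_name = track.get("name", "")
--         if base_name not in grouped:
--             grouped[base_name] = []
--         grouped[base_name].append(track)
--     return grouped
-- ===== SOURCE B (Python) =====
-- def _group_tracks_by_base_name(tracks):
--     """Group tracks by their base name (without variant)."""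
--     names = dict.fromkeys(track.get("name", "") for track in tracks)
--     return {name: [t for t in tracks if t.get("name", "") == name] for name in names}
-- ===== Notes on version B (the rewrite author's own statement) =====
-- stated objective: alternative
-- what changed: Replaces the incremental dict-of-lists built by conditional insertion and append with a two-pass comprehension: first collect the distinct names in first-seen order via dict.fromkeys, then build each group with a filter over the whole input.
import Mathlib
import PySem

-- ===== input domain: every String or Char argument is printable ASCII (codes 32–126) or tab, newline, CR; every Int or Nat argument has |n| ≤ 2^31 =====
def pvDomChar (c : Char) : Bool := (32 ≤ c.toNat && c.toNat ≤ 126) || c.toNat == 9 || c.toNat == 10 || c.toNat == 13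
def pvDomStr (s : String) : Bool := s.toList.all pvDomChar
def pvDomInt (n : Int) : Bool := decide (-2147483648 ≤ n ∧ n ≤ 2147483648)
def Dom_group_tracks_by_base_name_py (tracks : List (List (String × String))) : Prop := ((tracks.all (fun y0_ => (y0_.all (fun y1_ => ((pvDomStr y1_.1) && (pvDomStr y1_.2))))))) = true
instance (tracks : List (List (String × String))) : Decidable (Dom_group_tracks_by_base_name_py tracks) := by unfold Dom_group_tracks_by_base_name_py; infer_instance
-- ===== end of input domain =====

-- B replaces A's incremental dict-of-lists (conditional insert + append) by a two-pass
-- comprehension: ordered dedup of the names, then one filter of the whole input per name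
-- (objective: alternative decomposition, same return value).

-- ===== PORT A =====
-- track.get("name", "")
def pvTrackName (t : List (String × String)) : String := (PySem.Dict.mk t).getD "name" ""

def group_tracks_by_base_name_py (tracks : List (List (String × String))) : List (String × List (List (String × String))) :=
  (tracks.foldl (fun grouped track =>
      let base_name := pvTrackName track
      let grouped := if grouped.contains base_name then grouped else grouped.insert base_name []
      grouped.modify base_name [] (fun l => l ++ [track]))   -- grouped[base_name].append(track)
    PySem.Dict.empty).items

-- ===== PORT B =====
def group_tracks_by_base_name_py_alt (tracks : List (List (String × String))) : List (String × List (List (String × String))) :=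
  let names := PySem.List.dedup (tracks.map pvTrackName)     -- dict.fromkeys(...)
  names.map (fun name => (name, tracks.filter (fun t => pvTrackName t == name)))

-- ===== PRECONDITION & SPEC =====
def Spec_group_tracks_by_base_name_py (tracks : List (List (String × String))) (out : List (String × List (List (String × String)))) : Prop := out = group_tracks_by_base_name_py_alt tracks
instance (tracks : List (List (String × String))) (out : List (String × List (List (String × String)))) : Decidable (Spec_group_tracks_by_base_name_py tracks out) := by unfold Spec_group_tracks_by_base_name_py; infer_instance

-- ===== CLAIM (what is proved, stated in full; the proofs are below) =====
def Claim_equal_group_tracks_by_base_name_py : Prop := ∀ (tracks : List (List (String × String))), Dom_group_tracks_by_base_name_py tracks → Spec_group_tracks_by_base_name_py tracks (group_tracks_by_base_name_py tracks)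

-- ===== LEMMAS AND PROOFS =====

-- A's loop body, named for the lemmas below
def pvStep (g : PySem.Dict String (List (List (String × String)))) (track : List (String × String)) : PySem.Dict String (List (List (String × String))) :=
  let base_name := pvTrackName track
  let g := if g.contains base_name then g else g.insert base_name []
  g.modify base_name [] (fun l => l ++ [track])

lemma pvStep_keys (g : PySem.Dict String (List (List (String × String)))) (t : List (String × String)) :
    (pvStep g t).keys = PySem.Set.add g.keys (pvTrackName t) := by
  unfold pvStep
  by_cases h : g.contains (pvTrackName t) = true
  · simp only [h, if_true]
    rw [PySem.Dict.keys_modify, PySem.Dict.keys_insert_of_contains _ _ h,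
        PySem.Set.add_of_mem ((PySem.Dict.contains_iff_mem_keys g _).mp h)]
  · rw [Bool.not_eq_true] at h
    simp only [h, Bool.false_eq_true, if_false]
    rw [PySem.Dict.keys_modify, PySem.Dict.keys_insert_of_contains _ _ (PySem.Dict.contains_insert_self g _ _),
        PySem.Dict.keys_insert_of_not_contains _ _ h,
        PySem.Set.add_of_not_mem (by rw [← PySem.Dict.contains_iff_mem_keys]; simp [h])]

lemma pvStep_getD (g : PySem.Dict String (List (List (String × String)))) (t : List (String × String)) (n : String) :
    (pvStep g t).getD n [] = g.getD n [] ++ (if pvTrackName t == n then [t] else []) := by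
  unfold pvStep
  by_cases h : g.contains (pvTrackName t) = true
  · simp only [h, if_true]
    rw [PySem.Dict.getD_modify]
    by_cases hn : n = pvTrackName t
    · simp [hn]
    · simp [hn, Ne.symm hn, beq_iff_eq]
  · rw [Bool.not_eq_true] at h
    simp only [h, Bool.false_eq_true, if_false]
    rw [PySem.Dict.getD_modify]
    by_cases hn : n = pvTrackName t
    · subst hn
      simp [PySem.Dict.getD_insert_self, PySem.Dict.getD_of_not_contains g _ h]
    · rw [if_neg hn, PySem.Dict.getD_insert]
      simp [hn, Ne.symm hn, beq_iff_eq]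

lemma pvFoldl_keys (tracks : List (List (String × String))) (g : PySem.Dict String (List (List (String × String)))) :
    (tracks.foldl pvStep g).keys = PySem.Set.update g.keys (tracks.map pvTrackName) := by
  induction tracks generalizing g with
  | nil => simp [PySem.Set.update_nil]
  | cons t ts ih =>
    simp only [List.foldl_cons, List.map_cons, PySem.Set.update_cons]
    rw [ih, pvStep_keys]

lemma pvFoldl_getD (tracks : List (List (String × String))) (g : PySem.Dict String (List (List (String × String)))) (n : String) :
    (tracks.foldl pvStep g).getD n [] = g.getD n [] ++ tracks.filter (fun t => pvTrackName t == n) := by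
  induction tracks generalizing g with
  | nil => simp
  | cons t ts ih =>
    simp only [List.foldl_cons, List.filter_cons]
    rw [ih, pvStep_getD]
    by_cases h : pvTrackName t == n <;> simp [h]

-- ===== VERDICT (by name: the statement is the Claim_ definition above) =====
theorem group_tracks_by_base_name_py_spec : Claim_equal_group_tracks_by_base_name_py := by
  intro tracks _
  unfold Spec_group_tracks_by_base_name_py group_tracks_by_base_name_py group_tracks_by_base_name_py_alt
  have hfold : ∀ (ts : List (List (String × String))),
      ts.foldl (fun grouped track =>
        let base_name := pvTrackName track
        let grouped := if grouped.contains base_name then grouped else grouped.insert base_name []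
        grouped.modify base_name [] (fun l => l ++ [track])) PySem.Dict.empty
      = ts.foldl pvStep PySem.Dict.empty := fun ts => rfl
  rw [hfold]
  have hkeys : (tracks.foldl pvStep PySem.Dict.empty).keys
      = PySem.List.dedup (tracks.map pvTrackName) := by
    rw [pvFoldl_keys, PySem.Dict.keys_empty, PySem.Set.update_nil_left, PySem.List.dedup_eq_ofList]
  have hnodup : (tracks.foldl pvStep PySem.Dict.empty).keys.Nodup := by
    rw [hkeys, PySem.List.dedup_eq_ofList]; exact PySem.Set.nodup_ofList _
  rw [PySem.Dict.items_eq_map_keys _ hnodup [], hkeys]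
  apply List.map_congr_left
  intro n _
  rw [pvFoldl_getD, PySem.Dict.getD_empty]
  simp
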